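-- pv_equiv track=rewrite | github.com/daniel-reich/ubiquitous-fiesta | stXWy2iufNhBo9sTW_12.py | valid_rondo
-- ===== SOURCE A (Python) =====
-- def valid_rondo(s):
--   if(len(s)%2==0 or s=='A'):
--     return False
--   for i in range(0,len(s),2):
--     if(s[i]!='A'):
--       return False
--   if(s[-1]!='A'):
--     return False
--   return True
-- ===== SOURCE B (Python) =====
-- import re
--
-- _RONDO = re.compile(r'A(.A)+', re.DOTALL)
--
-- def valid_rondo(s):
--     return _RONDO.fullmatch(s) is not None
-- ===== Notes on version B (the rewrite author's own statement) =====
-- stated objective: idiomatic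
-- what changed: Replaced the manual even-index scan plus separate last-character check with a single precompiled regex fullmatch of the anchored pattern A(.A)+ (DOTALL), which enforces odd length >= 3 and 'A' at every even position at once.
import Mathlib
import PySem

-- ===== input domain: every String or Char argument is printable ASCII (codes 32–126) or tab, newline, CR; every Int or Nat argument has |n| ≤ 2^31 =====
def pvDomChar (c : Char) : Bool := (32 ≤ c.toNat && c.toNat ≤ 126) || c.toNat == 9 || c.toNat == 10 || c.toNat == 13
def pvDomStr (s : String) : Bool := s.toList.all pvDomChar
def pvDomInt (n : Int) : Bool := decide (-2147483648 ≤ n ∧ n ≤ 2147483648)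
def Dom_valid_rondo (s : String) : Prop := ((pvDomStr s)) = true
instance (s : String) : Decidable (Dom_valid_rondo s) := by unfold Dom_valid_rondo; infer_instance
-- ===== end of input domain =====

-- B replaces A's manual even-index loop plus separate last-char check by one anchored
-- regex fullmatch of A(.A)+ with DOTALL (ported below as a tiny hand matcher); objective: idiomatic.

-- ===== PORT A =====
-- the for-loop over range(0, len(s), 2) with early return, then the trailing s[-1] check
def pvLoopA (cs : List Char) (idxs : List Int) : Bool :=
  match idxs with
  | [] =>
      match PySem.List.pyGet? cs (-1) with
      | none => false
      | some c => if c ≠ 'A' then false else true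
  | i :: rest =>
      match PySem.List.pyGet? cs i with
      | none => false
      | some c => if c ≠ 'A' then false else pvLoopA cs rest

def valid_rondo (s : String) : Bool :=
  if PySem.Str.len s % 2 == 0 || s == "A" then false
  else pvLoopA s.toList (PySem.List.pyRange 0 (PySem.Str.len s) 2)

-- ===== PORT B =====
-- hand port of re.fullmatch(r'A(.A)+', s, re.DOTALL), exact for this fixed anchored
-- pattern: consume the leading 'A', then (.A)+ = at least one (any-char, 'A') pair;
-- pvPairs l matches (.A)* against the whole of l (each step eats one arbitrary char
-- and one 'A'; leftover odd character = no match).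
def pvPairs : List Char → Bool
  | [] => true
  | [_] => false
  | _ :: a :: rest => decide (a = 'A') && pvPairs rest

def valid_rondo_alt (s : String) : Bool :=
  match s.toList with
  | c :: d :: rest => decide (c = 'A') && pvPairs (d :: rest)
  | _ => false

-- ===== PRECONDITION & SPEC =====
def Spec_valid_rondo (s : String) (out : Bool) : Prop := out = valid_rondo_alt s
instance (s : String) (out : Bool) : Decidable (Spec_valid_rondo s out) := by unfold Spec_valid_rondo; infer_instance

-- ===== CLAIM (what is proved, stated in full; the proofs are below) =====
def Claim_equal_valid_rondo : Prop := ∀ (s : String), Dom_valid_rondo s → Spec_valid_rondo s (valid_rondo s)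

-- ===== LEMMAS AND PROOFS =====

-- "every even index of l holds 'A'" — A's loop is proved equal to this below
def pvEvens : List Char → Bool
  | [] => true
  | [c] => decide (c = 'A')
  | c :: _ :: rest => decide (c = 'A') && pvEvens rest

theorem pyRange_two_nil (a b : Int) (h : b ≤ a) : PySem.List.pyRange a b 2 = [] := by
  rw [PySem.List.pyRange_of_pos a b (by norm_num)]
  simp [if_neg (not_lt.mpr h)]

theorem pyRange_two_cons (a b : Int) (h : a < b) :
    PySem.List.pyRange a b 2 = a :: PySem.List.pyRange (a + 2) b 2 := by
  rw [PySem.List.pyRange_of_pos a b (by norm_num),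
      PySem.List.pyRange_of_pos (a + 2) b (by norm_num)]
  by_cases h2 : a + 2 < b
  · rw [if_pos h, if_pos h2]
    have hcount : ((b - a + 2 - 1) / 2).toNat = ((b - (a + 2) + 2 - 1) / 2).toNat + 1 := by
      omega
    rw [hcount, List.range_succ_eq_map]
    simp only [List.map_cons, List.map_map, Nat.cast_zero, mul_zero, add_zero]
    congr 1
    apply List.map_congr_left
    intro k _
    simp only [Function.comp_apply, Nat.succ_eq_add_one]
    push_cast
    ring
  · rw [if_pos h, if_neg h2]
    have hcount : ((b - a + 2 - 1) / 2).toNat = 1 := by omega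
    simp [hcount, List.range_succ]

theorem pvPairs_odd_false : ∀ (l : List Char), l.length % 2 = 1 → pvPairs l = false
  | [], h => by simp at h
  | [_], _ => rfl
  | _ :: _ :: rest, h => by
      have hr : rest.length % 2 = 1 := by simp only [List.length_cons] at h; omega
      simp only [pvPairs]
      rw [pvPairs_odd_false rest hr]
      simp

theorem pvPairs_cons_odd : ∀ (l : List Char), l.length % 2 = 1 → ∀ (c : Char),
    pvPairs (c :: l) = pvEvens l
  | [], h, _ => by simp at h
  | [x], _, c => by simp [pvPairs, pvEvens]
  | x :: y :: rest, h, c => by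
      have hr : rest.length % 2 = 1 := by simp only [List.length_cons] at h; omega
      simp only [pvPairs, pvEvens]
      rw [pvPairs_cons_odd rest hr y]

-- the loop (and the redundant trailing s[-1] check) computes pvEvens of the suffix
theorem loopA_eq (cs : List Char) : ∀ (k : Nat), k < cs.length →
    (cs.length - k) % 2 = 1 →
    pvLoopA cs (PySem.List.pyRange k cs.length 2) = pvEvens (cs.drop k) := by
  intro k
  induction hm : cs.length - k using Nat.strong_induction_on generalizing k with
  | _ m ih =>
    intro hk hodd
    rw [pyRange_two_cons _ _ (by exact_mod_cast hk)]
    simp only [pvLoopA]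
    rw [PySem.List.pyGet?_natCast, List.getElem?_eq_getElem hk]
    have hdropk : cs.drop k = cs[k] :: cs.drop (k + 1) := List.drop_eq_getElem_cons hk
    by_cases hlast : cs.length = k + 1
    · -- last even index: the loop ends and the s[-1] check re-checks cs[k]
      have hnil : PySem.List.pyRange ((k : Int) + 2) cs.length 2 = [] :=
        pyRange_two_nil _ _ (by omega)
      rw [hnil]
      have hlastget : PySem.List.pyGet? cs (-1) = some cs[k] := by
        rw [PySem.List.pyGet?_neg_one, List.getLast?_eq_getElem?,
            List.getElem?_eq_getElem (by omega : cs.length - 1 < cs.length)]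
        congr 1; congr 1; omega
      have hdrop1 : cs.drop (k + 1) = [] := List.drop_of_length_le (by omega)
      rw [hdropk, hdrop1]
      simp only [pvLoopA, hlastget, pvEvens]
      by_cases hAc : cs[k] = 'A' <;> simp [hAc]
    · -- at least two more characters remain
      have hk2 : k + 2 < cs.length := by omega
      have hk1 : k + 1 < cs.length := by omega
      have hdropk1 : cs.drop (k + 1) = cs[k + 1] :: cs.drop (k + 2) :=
        List.drop_eq_getElem_cons hk1
      have hcast : ((k : Int) + 2) = ((k + 2 : Nat) : Int) := by push_cast; ring
      rw [hcast]
      rw [ih (cs.length - (k + 2)) (by omega) (k + 2) rfl hk2 (by omega)]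
      rw [hdropk, hdropk1]
      simp only [pvEvens]
      by_cases hAc : cs[k] = 'A' <;> simp [hAc]

-- ===== VERDICT (by name: the statement is the Claim_ definition above) =====
theorem valid_rondo_spec : Claim_equal_valid_rondo := by
  intro s _
  unfold Spec_valid_rondo valid_rondo valid_rondo_alt
  have hlen : PySem.Str.len s = (s.toList.length : Int) := PySem.Str.len_eq s
  by_cases hA : s = "A"
  · subst hA; decide
  · have hAne : (s == "A") = false := by simp [hA]
    rw [hlen, hAne]
    by_cases heven : s.toList.length % 2 = 0
    · -- even length (including empty): both sides are false
      have hc : (((s.toList.length : Int)) % 2 == 0) = true := by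
        simp only [beq_iff_eq]; omega
      rw [hc]
      simp only [Bool.true_or, if_true]
      rcases hcs : s.toList with _ | ⟨c, _ | ⟨d, rest⟩⟩
      · rfl
      · rfl
      · have hodd1 : (d :: rest).length % 2 = 1 := by
          have := heven; rw [hcs] at this; simp only [List.length_cons] at this ⊢; omega
        show false = (decide (c = 'A') && pvPairs (d :: rest))
        rw [pvPairs_odd_false _ hodd1]
        simp
    · -- odd length, s ≠ "A": A's loop computes pvEvens, B matches it
      have hodd : s.toList.length % 2 = 1 := by omega
      have hpos : 0 < s.toList.length := by omega
      have hc : (((s.toList.length : Int)) % 2 == 0) = false := by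
        simp only [beq_eq_false_iff_ne]; omega
      rw [hc]
      simp only [Bool.false_or]
      have h0 : ((0 : Int)) = ((0 : Nat) : Int) := rfl
      rw [h0, loopA_eq s.toList 0 hpos (by simpa using hodd), List.drop_zero]
      rcases hcs : s.toList with _ | ⟨c, _ | ⟨d, rest⟩⟩
      · rw [hcs] at hpos; simp at hpos
      · -- length 1, and s ≠ "A" forces c ≠ 'A'
        have hcne : c ≠ 'A' := by
          intro hceq
          apply hA
          apply String.toList_inj.mp
          rw [hcs, hceq]; rfl
        simp [pvEvens, hcne]
      · have hr : rest.length % 2 = 1 := by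
          have := hodd; rw [hcs] at this; simp only [List.length_cons] at this ⊢; omega
        show (if (false = true) then false else pvEvens (c :: d :: rest)) =
          (decide (c = 'A') && pvPairs (d :: rest))
        rw [pvPairs_cons_odd rest hr d]
        simp [pvEvens]
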